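-- pv_equiv track=rewrite | github.com/benjaminorr/DART | scripts/run_fps_benchmark.py | get_enc_dec_config
-- ===== SOURCE A (Python) =====
-- def get_enc_dec_config(num_classes):
--     """Return (engine_path, trt_max_classes) for given class count."""
--     configs = [
--         (1, "enc_dec_1008_c1_presence_fp16_opt5.engine"),
--         (2, "enc_dec_1008_c2_presence_fp16_opt5.engine"),
--         (4, "enc_dec_1008_c4_presence_fp16_opt5.engine"),
--         (8, "enc_dec_1008_c8_presence_fp16_opt5.engine"),
--         (16, "enc_dec_1008_c16_presence_fp16_opt5.engine"),
--     ]
--     for max_c, engine in configs: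
--         if num_classes <= max_c:
--             return engine, max_c
--     # 80 classes: use 16-class engine in batched mode
--     return "enc_dec_1008_c16_presence_fp16_opt5.engine", 16
-- ===== SOURCE B (Python) =====
-- def get_enc_dec_config(num_classes):
--     """Return (engine_path, trt_max_classes) for given class count."""
--     # Closed-form capacity bucket: next power of two >= num_classes, clamped to [1, 16].
--     c = 1 if num_classes <= 1 else min(16, 1 << (num_classes - 1).bit_length())
--     return f"enc_dec_1008_c{c}_presence_fp16_opt5.engine", c
-- ===== Notes on version B (the rewrite author's own statement) =====
-- stated objective: simpler
-- what changed: Replaced the linear scan over a hard-coded (capacity, filename) table by a closed-form bucket computation (next power of two via bit_length, clamped to [1,16]) plus one f-string.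
import Mathlib
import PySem

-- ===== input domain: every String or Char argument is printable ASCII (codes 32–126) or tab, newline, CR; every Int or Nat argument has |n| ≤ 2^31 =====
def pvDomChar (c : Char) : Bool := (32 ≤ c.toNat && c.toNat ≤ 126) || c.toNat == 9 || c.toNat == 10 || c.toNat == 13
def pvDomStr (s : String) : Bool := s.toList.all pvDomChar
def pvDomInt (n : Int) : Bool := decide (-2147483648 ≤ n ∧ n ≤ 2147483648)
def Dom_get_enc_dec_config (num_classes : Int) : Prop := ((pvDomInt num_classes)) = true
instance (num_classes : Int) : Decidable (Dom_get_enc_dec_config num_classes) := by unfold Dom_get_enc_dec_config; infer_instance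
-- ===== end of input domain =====

-- B replaces A's linear scan of a (capacity, filename) table by a closed-form
-- bucket (next power of two clamped to [1,16]) plus string formatting: simpler.


-- ===== PORT A =====
-- the for-loop over the literal config table, with early return
def pvConfigLoop (configs : List (Int × String)) (num_classes : Int) : String × Int :=
  match configs with
  | [] => ("enc_dec_1008_c16_presence_fp16_opt5.engine", 16)
  | (max_c, engine) :: rest =>
      if num_classes ≤ max_c then (engine, max_c) else pvConfigLoop rest num_classes

def get_enc_dec_config (num_classes : Int) : String × Int :=
  pvConfigLoop
    [(1, "enc_dec_1008_c1_presence_fp16_opt5.engine"),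
     (2, "enc_dec_1008_c2_presence_fp16_opt5.engine"),
     (4, "enc_dec_1008_c4_presence_fp16_opt5.engine"),
     (8, "enc_dec_1008_c8_presence_fp16_opt5.engine"),
     (16, "enc_dec_1008_c16_presence_fp16_opt5.engine")]
    num_classes

-- ===== PORT B =====
def get_enc_dec_config_alt (num_classes : Int) : String × Int :=
  let c : Int :=
    if num_classes ≤ 1 then 1
    else min 16 (2 ^ PySem.Int.bitLength (num_classes - 1))
  (PySem.Str.join "" ["enc_dec_1008_c", PySem.Int.toStr c, "_presence_fp16_opt5.engine"], c)

-- ===== PRECONDITION & SPEC =====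
def Spec_get_enc_dec_config (num_classes : Int) (out : String × Int) : Prop := out = get_enc_dec_config_alt num_classes
instance (num_classes : Int) (out : String × Int) : Decidable (Spec_get_enc_dec_config num_classes out) := by unfold Spec_get_enc_dec_config; infer_instance

-- ===== CLAIM (what is proved, stated in full; the proofs are below) =====
def Claim_equal_get_enc_dec_config : Prop := ∀ (num_classes : Int), Dom_get_enc_dec_config num_classes → Spec_get_enc_dec_config num_classes (get_enc_dec_config num_classes)

-- ===== LEMMAS AND PROOFS =====

-- for num_classes ≥ 17 the clamped power-of-two bucket is 16
theorem pv_min_eq_16 (n : Int) (h : 17 ≤ n) :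
    min (16 : Int) (2 ^ PySem.Int.bitLength (n - 1)) = 16 := by
  apply min_eq_left
  have hlt := PySem.Int.lt_two_pow_bitLength (n - 1)
  have h16 : 16 ≤ (n - 1).natAbs := by omega
  have : (16 : Nat) < 2 ^ PySem.Int.bitLength (n - 1) := lt_of_le_of_lt h16 hlt
  exact_mod_cast le_of_lt this

-- ===== VERDICT (by name: the statement is the Claim_ definition above) =====
theorem get_enc_dec_config_spec : Claim_equal_get_enc_dec_config := by
  intro n _
  show get_enc_dec_config n = get_enc_dec_config_alt n
  by_cases h16 : n ≤ 16
  · by_cases h1 : n ≤ 1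
    · simp only [get_enc_dec_config, get_enc_dec_config_alt, pvConfigLoop, if_pos h1]
      decide
    · have h2 : 2 ≤ n := by omega
      interval_cases n <;> decide
  · have hc := pv_min_eq_16 n (by omega)
    simp only [get_enc_dec_config, get_enc_dec_config_alt, pvConfigLoop, hc]
    rw [if_neg (by omega), if_neg (by omega), if_neg (by omega), if_neg (by omega),
        if_neg (by omega), if_neg (by omega)]
    decide
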